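-- pv_equiv track=rewrite | github.com/Maikittitee/OOD-KMITL | wk02/stack/ex04.py | look_back
-- ===== SOURCE A (Python) =====
-- def	look_back(stack):
-- 	cnt = 1
-- 	if (len(stack) == 0):
-- 		return (0)
-- 	stack.reverse()
-- 	max = stack[0]
-- 	for i in stack:
-- 		if (i > max):
-- 			max = i
-- 			cnt += 1
-- 	return (cnt)
-- ===== SOURCE B (Python) =====
-- def look_back(stack):
--     stack.reverse()
--     if not stack:
--         return 0
--     acc = []
--     m = stack[0]
--     for x in stack:
--         m = m if m >= x else x
--         acc.append(m)
--     return 1 + sum(1 for a, b in zip(acc, acc[1:]) if b > a)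
-- ===== Notes on version B (the rewrite author's own statement) =====
-- stated objective: alternative
-- what changed: B builds a running-maximum prefix table in one pass and then counts strict adjacent increases in a second zip pass, instead of A's single fused track-and-count loop with a counter.
import Mathlib
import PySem

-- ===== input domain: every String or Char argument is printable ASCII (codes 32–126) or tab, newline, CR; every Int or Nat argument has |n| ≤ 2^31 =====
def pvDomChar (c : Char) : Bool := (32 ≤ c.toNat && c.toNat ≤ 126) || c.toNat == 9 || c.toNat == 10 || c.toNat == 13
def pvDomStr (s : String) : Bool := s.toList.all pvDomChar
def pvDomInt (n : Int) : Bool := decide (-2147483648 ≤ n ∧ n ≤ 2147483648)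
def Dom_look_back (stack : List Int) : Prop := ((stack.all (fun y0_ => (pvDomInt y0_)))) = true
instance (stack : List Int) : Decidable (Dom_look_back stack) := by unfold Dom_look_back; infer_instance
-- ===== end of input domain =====

-- B: table-then-scan decomposition (running-max prefix table, then count strict adjacent
-- increases) instead of A's fused track-and-count loop; both Pythons reverse the stack in
-- place (same side effect), the equivalence proved is about the return value.

-- ===== PORT A =====
-- Python A: early return 0 on empty, reverse, max := stack[0], one fused loop counting new maxima.
def look_back (stack : List Int) : Int :=
  if stack.length = 0 then 0
  else
    match stack.reverse with
    | [] => 0   -- unreachable: stack is nonempty here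
    | h :: t =>
      (List.foldl (fun (p : Int × Int) i => if i > p.1 then (i, p.2 + 1) else p)
        (h, 1) (h :: t)).2

-- ===== PORT B =====
-- Python B: reverse, empty guard, build prefix-max table acc by appending, then count
-- strict increases over zip(acc, acc[1:]).
def look_back_alt (stack : List Int) : Int :=
  match stack.reverse with
  | [] => 0
  | h :: t =>
    let acc := ((h :: t).foldl
      (fun (s : List Int × Int) x =>
        let m := if s.2 ≥ x then s.2 else x
        (s.1 ++ [m], m)) (([] : List Int), h)).1
    1 + (((acc.zip acc.tail).filter (fun p => decide (p.2 > p.1))).length : Int)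

-- ===== PRECONDITION & SPEC =====
def Spec_look_back (stack : List Int) (out : Int) : Prop := out = look_back_alt stack
instance (stack : List Int) (out : Int) : Decidable (Spec_look_back stack out) := by unfold Spec_look_back; infer_instance

-- ===== CLAIM (what is proved, stated in full; the proofs are below) =====
def Claim_equal_look_back : Prop := ∀ (stack : List Int), Dom_look_back stack → Spec_look_back stack (look_back stack)

-- ===== LEMMAS AND PROOFS =====

/-- Python's `m if m >= x else x`. -/
def pvMax (m x : Int) : Int := if m ≥ x then m else x

/-- Number of strict running maxima of `l` above current max `m`. -/
def countNew (m : Int) : List Int → Nat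
  | [] => 0
  | x :: xs => (if x > m then 1 else 0) + countNew (pvMax m x) xs

/-- Running-max prefix table of `l` starting from current max `m`. -/
def runAcc (m : Int) : List Int → List Int
  | [] => []
  | x :: xs => pvMax m x :: runAcc (pvMax m x) xs

/-- Number of strict adjacent increases in a list. -/
def pairsCount : List Int → Nat
  | [] => 0
  | [_] => 0
  | a :: b :: t => (if b > a then 1 else 0) + pairsCount (b :: t)

theorem foldA_eq (l : List Int) : ∀ (m : Int) (c : Int),
    (List.foldl (fun (p : Int × Int) i => if i > p.1 then (i, p.2 + 1) else p) (m, c) l).2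
      = c + (countNew m l : Int) := by
  induction l with
  | nil => intro m c; simp [countNew]
  | cons x xs ih =>
    intro m c
    simp only [List.foldl, countNew, pvMax]
    by_cases h : x > m
    · have hm : ¬ m ≥ x := by omega
      simp [h, hm, ih]
      ring
    · have hm : m ≥ x := by omega
      simp [h, hm, ih]

theorem foldB_eq (l : List Int) : ∀ (pre : List Int) (m : Int),
    (List.foldl (fun (s : List Int × Int) x =>
        let mx := if s.2 ≥ x then s.2 else x
        (s.1 ++ [mx], mx)) (pre, m) l).1 = pre ++ runAcc m l := by
  induction l with
  | nil => intro pre m; simp [runAcc]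
  | cons x xs ih =>
    intro pre m
    simp only [List.foldl, runAcc]
    rw [ih]
    simp [pvMax, List.append_assoc]

theorem zip_count_eq (l : List Int) :
    ((l.zip l.tail).filter (fun p => decide (p.2 > p.1))).length = pairsCount l := by
  induction l with
  | nil => simp [pairsCount]
  | cons a t ih =>
    cases t with
    | nil => simp [pairsCount]
    | cons b t' =>
      simp only [List.tail] at ih ⊢
      simp only [List.zip_cons_cons, List.filter_cons, pairsCount]
      by_cases h : b > a <;> simp [h, ih, Nat.add_comm]

theorem pairs_runAcc (l : List Int) : ∀ (m : Int),
    pairsCount (m :: runAcc m l) = countNew m l := by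
  induction l with
  | nil => intro m; simp [runAcc, countNew, pairsCount]
  | cons x xs ih =>
    intro m
    simp only [runAcc, countNew, pairsCount, ih]
    by_cases h : x > m
    · have hm : ¬ m ≥ x := by omega
      have hgt : pvMax m x > m := by simp [pvMax, hm]; omega
      simp [pvMax, hm, h]
    · have hm : m ≥ x := by omega
      have hng : ¬ pvMax m x > m := by simp [pvMax, hm]
      simp [pvMax, hm, h]

-- ===== VERDICT (by name: the statement is the Claim_ definition above) =====
theorem look_back_spec : Claim_equal_look_back := by
  intro stack _
  unfold Spec_look_back look_back look_back_alt
  by_cases hemp : stack = []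
  · subst hemp; simp
  · have hlen : ¬ stack.length = 0 := by simpa using hemp
    simp only [hlen, if_false]
    obtain ⟨h, t, hrev⟩ : ∃ h t, stack.reverse = h :: t := by
      cases hr : stack.reverse with
      | nil => exact absurd (by simpa using congrArg List.reverse hr) hemp
      | cons a b => exact ⟨a, b, rfl⟩
    rw [hrev]
    simp only []
    rw [foldB_eq]
    have hacc : runAcc h (h :: t) = h :: runAcc h t := by
      simp [runAcc, pvMax]
    rw [List.nil_append, hacc, zip_count_eq, pairs_runAcc]
    -- A side: first iteration keeps (h, 1) since h > h is false
    simp only [List.foldl]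
    have : ¬ (h > h) = True := by simp
    rw [foldA_eq] at *
    simp
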